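-- pv_equiv track=rewrite | github.com/felipecidade94/analisador-arquivos | tempCodeRunnerFile.py | infer_tipo_from_name
-- ===== SOURCE A (Python) =====
-- def infer_tipo_from_name(name: str) -> str:
--     n = name.lower()
--     return next(
--         (
--             ext[1:]
--             for ext in (
--                 '.pdf',
--                 '.docx',
--                 '.xlsx',
--                 '.xls',
--                 '.csv',
--                 '.txt',
--                 '.md',
--             )
--             if n.endswith(ext)
--         ),
--         'desconhecido',
--     )
-- ===== SOURCE B (Python) =====
-- def infer_tipo_from_name(name: str) -> str:
--     n = name.lower()
--     parts = n.rsplit('.', 1)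
--     if len(parts) == 2 and parts[1] in {'pdf', 'docx', 'xlsx', 'xls', 'csv', 'txt', 'md'}:
--         return parts[1]
--     return 'desconhecido'
-- ===== Notes on version B (the rewrite author's own statement) =====
-- stated objective: idiomatic
-- what changed: Instead of scanning seven candidate suffixes with endswith, B parses the trailing extension once with rsplit('.', 1) and does a single set-membership test.
import Mathlib
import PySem

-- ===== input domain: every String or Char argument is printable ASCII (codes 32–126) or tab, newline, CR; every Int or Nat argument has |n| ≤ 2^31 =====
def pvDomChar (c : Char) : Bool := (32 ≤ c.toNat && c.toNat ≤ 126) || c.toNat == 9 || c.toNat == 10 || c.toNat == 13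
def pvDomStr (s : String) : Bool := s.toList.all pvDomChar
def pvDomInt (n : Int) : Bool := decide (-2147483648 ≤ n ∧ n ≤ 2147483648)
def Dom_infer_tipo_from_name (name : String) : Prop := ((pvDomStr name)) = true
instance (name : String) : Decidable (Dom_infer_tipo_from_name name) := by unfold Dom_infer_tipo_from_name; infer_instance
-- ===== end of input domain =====

-- B re-implements the suffix scan as one rsplit('.',1) parse plus a single membership test (idiomatic).

-- ===== PORT A =====
-- A: lowercase, then return the first of seven candidate suffixes that n ends with (the
-- 'next' over the generator is an if-chain in source order), else 'desconhecido'.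
def infer_tipo_from_name (name : String) : String :=
  let n := PySem.Chars.lower name.toList
  if PySem.Chars.endswith n ".pdf".toList then "pdf"
  else if PySem.Chars.endswith n ".docx".toList then "docx"
  else if PySem.Chars.endswith n ".xlsx".toList then "xlsx"
  else if PySem.Chars.endswith n ".xls".toList then "xls"
  else if PySem.Chars.endswith n ".csv".toList then "csv"
  else if PySem.Chars.endswith n ".txt".toList then "txt"
  else if PySem.Chars.endswith n ".md".toList then "md"
  else "desconhecido"

-- ===== PORT B =====
-- the membership set of Source B, as the list of its distinct elements
def pvKnownExts : List (List Char) :=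
  ["pdf".toList, "docx".toList, "xlsx".toList, "xls".toList, "csv".toList, "txt".toList, "md".toList]

-- hand port of n.rsplit('.', 1) (PySem has no rsplit): split at the LAST '.' by scanning the
-- reverse; rest = [] means no '.' (rsplit yields one part), exact on all inputs.
def infer_tipo_from_name_alt (name : String) : String :=
  let n := PySem.Chars.lower name.toList
  let r := n.reverse
  let rest := r.dropWhile (· != '.')
  match rest with
  | [] => "desconhecido"
  | _ :: _ =>
    let ext := (r.takeWhile (· != '.')).reverse
    if pvKnownExts.contains ext then String.ofList ext else "desconhecido"

-- ===== PRECONDITION & SPEC =====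
def Spec_infer_tipo_from_name (name : String) (out : String) : Prop := out = infer_tipo_from_name_alt name
instance (name : String) (out : String) : Decidable (Spec_infer_tipo_from_name name out) := by unfold Spec_infer_tipo_from_name; infer_instance

-- ===== CLAIM (what is proved, stated in full; the proofs are below) =====
def Claim_equal_infer_tipo_from_name : Prop := ∀ (name : String), Dom_infer_tipo_from_name name → Spec_infer_tipo_from_name name (infer_tipo_from_name name)

-- ===== LEMMAS AND PROOFS =====

-- 'n ends with "." ++ t' read on the reversed list: t.reverse ++ ['.'] is a prefix of n.reverse
-- iff the reversed scan stops exactly at t.reverse and actually finds a dot.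
theorem pvSuffixChar (t' : List Char) (ht : '.' ∉ t') (r : List Char) :
    (t' ++ ['.'] <+: r) ↔ (r.takeWhile (· != '.') = t' ∧ r.dropWhile (· != '.') ≠ []) := by
  induction t' generalizing r with
  | nil =>
    cases r with
    | nil => simp
    | cons c rs =>
      by_cases hc : c = '.'
      · subst hc; simp
      · simp [hc, List.cons_prefix_cons,
          (by simpa using Ne.symm hc : ¬ ('.' = c))]
  | cons a t'' ih =>
    have ha : a ≠ '.' := by intro h; exact ht (h ▸ List.mem_cons_self)
    have ht'' : '.' ∉ t'' := fun h => ht (List.mem_cons_of_mem _ h)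
    cases r with
    | nil => simp
    | cons c rs =>
      by_cases hc : c = a
      · subst hc
        simp [List.cons_prefix_cons, ha, ih ht'' rs]
      · have hc' : ¬ (a = c) := fun h => hc h.symm
        by_cases hdot : c = '.'
        · subst hdot
          simp [List.cons_prefix_cons, hc']
        · simp [List.cons_prefix_cons, hc', hdot, hc]

-- endswith, rewritten to the reversed-scan form used by B's port
theorem pvEndswith (n : List Char) (t : List Char) (ht : '.' ∉ t) :
    PySem.Chars.endswith n ('.' :: t) =
      (decide (n.reverse.takeWhile (· != '.') = t.reverse) &&
       decide (n.reverse.dropWhile (· != '.') ≠ [])) := by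
  have ht' : '.' ∉ t.reverse := by simpa using ht
  rw [Bool.eq_iff_iff]
  simp only [PySem.Chars.endswith_iff, Bool.and_eq_true, decide_eq_true_eq]
  rw [← List.reverse_prefix]
  simpa using pvSuffixChar t.reverse ht' n.reverse

-- the if-chain over 'ext = candidate' agrees with one membership test returning ext
theorem pvChain (ext : List Char) :
    (if ext = ['p','d','f'] then "pdf"
     else if ext = ['d','o','c','x'] then "docx"
     else if ext = ['x','l','s','x'] then "xlsx"
     else if ext = ['x','l','s'] then "xls"
     else if ext = ['c','s','v'] then "csv"
     else if ext = ['t','x','t'] then "txt"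
     else if ext = ['m','d'] then "md"
     else "desconhecido")
    = (if pvKnownExts.contains ext then String.ofList ext else "desconhecido") := by
  by_cases h1 : ext = ['p','d','f']; · subst h1; decide
  by_cases h2 : ext = ['d','o','c','x']; · subst h2; decide
  by_cases h3 : ext = ['x','l','s','x']; · subst h3; decide
  by_cases h4 : ext = ['x','l','s']; · subst h4; decide
  by_cases h5 : ext = ['c','s','v']; · subst h5; decide
  by_cases h6 : ext = ['t','x','t']; · subst h6; decide
  by_cases h7 : ext = ['m','d']; · subst h7; decide
  simp [pvKnownExts, h1, h2, h3, h4, h5, h6, h7]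

theorem infer_tipo_main (n : List Char) :
    (if PySem.Chars.endswith n ('.'::['p','d','f']) then "pdf"
     else if PySem.Chars.endswith n ('.'::['d','o','c','x']) then "docx"
     else if PySem.Chars.endswith n ('.'::['x','l','s','x']) then "xlsx"
     else if PySem.Chars.endswith n ('.'::['x','l','s']) then "xls"
     else if PySem.Chars.endswith n ('.'::['c','s','v']) then "csv"
     else if PySem.Chars.endswith n ('.'::['t','x','t']) then "txt"
     else if PySem.Chars.endswith n ('.'::['m','d']) then "md"
     else "desconhecido")
    = (match n.reverse.dropWhile (· != '.') with
       | [] => "desconhecido"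
       | _ :: _ =>
         let ext := (n.reverse.takeWhile (· != '.')).reverse
         if pvKnownExts.contains ext then String.ofList ext else "desconhecido") := by
  have e1 := pvEndswith n ['p','d','f'] (by decide)
  have e2 := pvEndswith n ['d','o','c','x'] (by decide)
  have e3 := pvEndswith n ['x','l','s','x'] (by decide)
  have e4 := pvEndswith n ['x','l','s'] (by decide)
  have e5 := pvEndswith n ['c','s','v'] (by decide)
  have e6 := pvEndswith n ['t','x','t'] (by decide)
  have e7 := pvEndswith n ['m','d'] (by decide)
  cases hrest : n.reverse.dropWhile (· != '.') with
  | nil =>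
    rw [hrest] at e1 e2 e3 e4 e5 e6 e7
    simp only [e1, e2, e3, e4, e5, e6, e7]
    simp
  | cons c cs =>
    have hd : decide (n.reverse.dropWhile (· != '.') ≠ []) = true := by simp [hrest]
    simp only [e1, e2, e3, e4, e5, e6, e7, hd, Bool.and_true]
    have hrev : ∀ t : List Char,
        (n.reverse.takeWhile (· != '.') = t.reverse)
          = ((n.reverse.takeWhile (· != '.')).reverse = t) := by
      intro t
      simp [List.reverse_eq_iff, eq_comm]
    simp only [hrev, decide_eq_true_eq]
    exact pvChain ((n.reverse.takeWhile (· != '.')).reverse)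

-- ===== VERDICT (by name: the statement is the Claim_ definition above) =====
theorem infer_tipo_from_name_spec : Claim_equal_infer_tipo_from_name := by
  intro name _
  unfold Spec_infer_tipo_from_name infer_tipo_from_name infer_tipo_from_name_alt
  exact infer_tipo_main (PySem.Chars.lower name.toList)
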